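-- pv_equiv track=rewrite | github.com/amato-gianluca/aoc2024 | puzzle4/all.py | search_x_word
-- ===== SOURCE A (Python) =====
-- def check_word(m: list[str], i: int, j: int, stepi: int, stepj: int, word: str) -> bool:
--     """
--     Return true if in the character matrix `m`, starting from position (`i`, `j`), and
--     using steps (`stepi`, `stepj`), contains `word`. It also works if `m` is jagged.
--     """
--     for c in word:
--         if 0 <= i < len(m) and 0 <= j < len(m[i]) and m[i][j] == c:
--             i += stepi
--             j += stepj
--         else:
--             return False
--     return True
--
-- def search_x_word(m: list[str], word: str):
--     """
--     Count the number of times `word` occurs in `m` in X shape.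
--     """
--     count = 0
--     for i in range(len(m)):
--         lasti = i + len(word) - 1
--         for j in range(len(m[i])):
--             lastj = j + len(word) - 1
--             if check_word(m, i, j, 1, 1, word) or check_word(m, lasti, lastj, -1, -1, word):
--                 if check_word(m, i, lastj, 1, -1, word) or check_word(m, lasti, j, -1, 1, word):
--                     count += 1
--     return count
-- ===== SOURCE B (Python) =====
-- def search_x_word(m: list[str], word: str):
--     """
--     Count the number of times `word` occurs in `m` in X shape.
--     """
--     L = len(word)
--     targets = {word, word[::-1]}
--
--     def diag(i: int, j: int, si: int, sj: int):
--         """Collect L cells starting at (i, j) with step (si, sj); None if any is out of bounds."""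
--         chars = []
--         for _ in range(L):
--             if not (0 <= i < len(m) and 0 <= j < len(m[i])):
--                 return None
--             chars.append(m[i][j])
--             i += si
--             j += sj
--         return ''.join(chars)
--
--     count = 0
--     for i in range(len(m)):
--         for j in range(len(m[i])):
--             if diag(i, j, 1, 1) in targets and diag(i, j + L - 1, 1, -1) in targets:
--                 count += 1
--     return count
-- ===== Notes on version B (the rewrite author's own statement) =====
-- stated objective: simpler
-- what changed: Instead of four directional character-by-character predicate scans per box, B extracts the box's two diagonals once as strings (None sentinel on any out-of-bounds cell) and tests membership of each in {word, reversed word}.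
import Mathlib
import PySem

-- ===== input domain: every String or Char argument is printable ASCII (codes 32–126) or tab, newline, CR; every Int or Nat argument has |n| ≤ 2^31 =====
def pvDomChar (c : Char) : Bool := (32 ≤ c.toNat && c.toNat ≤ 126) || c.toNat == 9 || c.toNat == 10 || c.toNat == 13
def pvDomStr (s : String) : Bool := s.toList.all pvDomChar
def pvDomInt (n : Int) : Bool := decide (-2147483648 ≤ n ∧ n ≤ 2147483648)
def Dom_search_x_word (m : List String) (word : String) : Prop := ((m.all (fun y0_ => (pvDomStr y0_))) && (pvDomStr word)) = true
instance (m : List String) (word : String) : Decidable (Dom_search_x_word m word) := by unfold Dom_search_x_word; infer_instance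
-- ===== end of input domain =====

-- B replaces A's four directional char-compare scans per box by extracting the box's two
-- diagonals once (None sentinel on out-of-bounds) and testing membership in {word, word[::-1]};
-- objective: simpler, same cost.


-- ===== PORT A =====
-- `for c in word` with early return → structural recursion on the char list;
-- the guarded access `m[i][j]` is exact: the bounds 0 ≤ i < len(m), 0 ≤ j < len(m[i])
-- are tested first, so the `.getD ""` default is never the value used.
def check_word (m : List String) (i j stepi stepj : Int) (cs : List Char) : Bool :=
  match cs with
  | [] => true
  | c :: rest =>
    if 0 ≤ i ∧ i < (m.length : Int) ∧ 0 ≤ j ∧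
       j < PySem.Str.len ((PySem.List.pyGet? m i).getD "") ∧
       PySem.Str.pyGet? ((PySem.List.pyGet? m i).getD "") j = some c
    then check_word m (i + stepi) (j + stepj) stepi stepj rest
    else false

def search_x_word (m : List String) (word : String) : Int :=
  (PySem.List.pyRange 0 (m.length : Int) 1).foldl (fun count i =>
    let lasti := i + PySem.Str.len word - 1
    (PySem.List.pyRange 0 (PySem.Str.len ((PySem.List.pyGet? m i).getD "")) 1).foldl (fun count j =>
      let lastj := j + PySem.Str.len word - 1
      if (check_word m i j 1 1 word.toList || check_word m lasti lastj (-1) (-1) word.toList) &&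
         (check_word m i lastj 1 (-1) word.toList || check_word m lasti j (-1) 1 word.toList)
      then count + 1 else count) count) 0

-- ===== PORT B =====
-- cell lookup of Source B's `0 <= i < len(m) and 0 <= j < len(m[i])` plus the char there
def pvCell (m : List String) (i j : Int) : Option Char :=
  if 0 ≤ i ∧ 0 ≤ j then (PySem.List.pyGet? m i).bind (fun row => PySem.Str.pyGet? row j) else none

-- Source B's `diag`: walk n cells from (i, j) with step (si, sj); none the moment a cell is out of bounds
def pvDiag (m : List String) (i j si sj : Int) : Nat → Option (List Char)
  | 0 => some []
  | n + 1 =>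
    match pvCell m i j with
    | none => none
    | some c => (pvDiag m (i + si) (j + sj) si sj n).map (c :: ·)

-- membership in Source B's two-element set {word, word[::-1]}
def pvIsTarget (w : List Char) (o : Option (List Char)) : Bool :=
  o == some w || o == some w.reverse

def search_x_word_alt (m : List String) (word : String) : Int :=
  let w := word.toList
  let L := w.length
  (PySem.List.pyRange 0 (m.length : Int) 1).foldl (fun count i =>
    (PySem.List.pyRange 0 (PySem.Str.len ((PySem.List.pyGet? m i).getD "")) 1).foldl (fun count j =>
      if pvIsTarget w (pvDiag m i j 1 1 L) && pvIsTarget w (pvDiag m i (j + (L : Int) - 1) 1 (-1) L)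
      then count + 1 else count) count) 0

-- ===== PRECONDITION & SPEC =====
def Spec_search_x_word (m : List String) (word : String) (out : Int) : Prop := out = search_x_word_alt m word
instance (m : List String) (word : String) (out : Int) : Decidable (Spec_search_x_word m word out) := by unfold Spec_search_x_word; infer_instance

-- ===== CLAIM (what is proved, stated in full; the proofs are below) =====
def Claim_equal_search_x_word : Prop := ∀ (m : List String) (word : String), Dom_search_x_word m word → Spec_search_x_word m word (search_x_word m word)

-- ===== LEMMAS AND PROOFS =====

-- A's per-cell guard is exactly "pvCell returns this char"
lemma pvCell_eq_some (m : List String) (i j : Int) (c : Char) :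
    pvCell m i j = some c ↔
      (0 ≤ i ∧ i < (m.length : Int) ∧ 0 ≤ j ∧
       j < PySem.Str.len ((PySem.List.pyGet? m i).getD "") ∧
       PySem.Str.pyGet? ((PySem.List.pyGet? m i).getD "") j = some c) := by
  unfold pvCell
  split_ifs with h
  · obtain ⟨hi, hj⟩ := h
    rcases hrow : PySem.List.pyGet? m i with _ | row
    · -- i out of range
      have : ¬ i < (m.length : Int) := by
        intro hlt
        have : (PySem.List.pyGet? m i).isSome := by
          obtain ⟨n, rfl⟩ := Int.eq_ofNat_of_zero_le hi
          simp [PySem.List.pyGet?_natCast]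
          exact_mod_cast hlt
        simp [hrow] at this
      simp [Option.bind, this, hi]
    · constructor
      · intro hc
        refine ⟨hi, ?_, hj, ?_, by simpa [hrow] using hc⟩
        · by_contra hlt
          have : PySem.List.pyGet? m i = none := by
            obtain ⟨n, rfl⟩ := Int.eq_ofNat_of_zero_le hi
            simp [PySem.List.pyGet?_natCast]
            omega
          simp [this] at hrow
        · have hc' : PySem.Str.pyGet? row j = some c := by simpa [hrow] using hc
          obtain ⟨n, rfl⟩ := Int.eq_ofNat_of_zero_le hj
          rw [PySem.Str.pyGet?_natCast] at hc'
          have := List.getElem?_eq_some_iff.mp hc'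
          simp [PySem.Str.len_eq]
          exact_mod_cast this.1
      · rintro ⟨_, _, _, _, hc⟩
        simpa [hrow] using hc
  · constructor
    · simp
    · rintro ⟨hi, _, hj, _⟩
      exact absurd ⟨hi, hj⟩ h

-- K1: A's directional scan succeeds iff B's extraction yields exactly the word
lemma check_word_iff_diag (m : List String) (si sj : Int) (w : List Char) :
    ∀ (i j : Int), check_word m i j si sj w = true ↔ pvDiag m i j si sj w.length = some w := by
  induction w with
  | nil => intro i j; simp [check_word, pvDiag]
  | cons c rest ih =>
    intro i j
    rw [check_word, List.length_cons]
    show (if _ then _ else false) = true ↔ pvDiag m i j si sj (rest.length + 1) = some (c :: rest)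
    rw [pvDiag]
    split_ifs with h
    · rw [(pvCell_eq_some m i j c).mpr h]
      simp only [Option.map_eq_some_iff]
      rw [ih]
      constructor
      · rintro hd; exact ⟨rest, hd, rfl⟩
      · rintro ⟨l, hl, he⟩
        injection he with _ h2
        exact h2 ▸ hl
    · rcases hc : pvCell m i j with _ | c'
      · simp
      · have hne : c' ≠ c := by
          intro he; subst he; exact h ((pvCell_eq_some m i j c').mp hc)
        simp only [Option.map_eq_some_iff]
        constructor
        · intro hfalse; simp at hfalse
        · rintro ⟨l, _, he⟩
          injection he with h1 _
          exact absurd h1 hne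

-- snoc form of pvDiag: the (n+1)-cell walk is the n-cell walk plus the far cell
lemma pvDiag_snoc (m : List String) (si sj : Int) :
    ∀ (n : Nat) (i j : Int),
      pvDiag m i j si sj (n + 1) =
        match pvCell m (i + n * si) (j + n * sj) with
        | none => none
        | some c => (pvDiag m i j si sj n).map (· ++ [c]) := by
  intro n
  induction n with
  | zero =>
    intro i j
    simp only [pvDiag, Nat.cast_zero, zero_mul, add_zero]
    rcases pvCell m i j with _ | c <;> simp
  | succ n ih =>
    intro i j
    conv_lhs => rw [pvDiag]
    conv_rhs => rw [pvDiag]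
    rw [ih (i + si) (j + sj)]
    push_cast
    have e1 : i + si + (n : Int) * si = i + ((n : Int) + 1) * si := by ring
    have e2 : j + sj + (n : Int) * sj = j + ((n : Int) + 1) * sj := by ring
    rw [e1, e2]
    rcases pvCell m i j with _ | c <;>
      rcases pvCell m (i + ((n : Int) + 1) * si) (j + ((n : Int) + 1) * sj) with _ | c2 <;>
      simp <;>
      rcases pvDiag m (i + si) (j + sj) si sj n with _ | l <;> simp

-- K2: walking the same n cells backwards collects the reversed list
lemma pvDiag_reverse (m : List String) (si sj : Int) :
    ∀ (n : Nat) (i j : Int),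
      pvDiag m (i + ((n : Int) - 1) * si) (j + ((n : Int) - 1) * sj) (-si) (-sj) n =
        (pvDiag m i j si sj n).map List.reverse := by
  intro n
  induction n with
  | zero => intro i j; simp [pvDiag]
  | succ n ih =>
    intro i j
    have estart : ∀ (a s : Int), a + ((n + 1 : Nat) - 1) * s = a + (n : Int) * s := by
      intro a s; push_cast; ring
    rw [estart i si, estart j sj]
    rw [pvDiag, pvDiag_snoc m si sj n i j]
    have eback : ∀ (a s : Int), a + (n : Int) * s + -s = a + ((n : Int) - 1) * s := by
      intro a s; ring
    rcases hc : pvCell m (i + (n : Int) * si) (j + (n : Int) * sj) with _ | c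
    · simp
    · rw [eback i si, eback j sj, ih i j]
      rcases pvDiag m i j si sj n with _ | l <;> simp

-- map-reverse on an Option
lemma map_reverse_eq_some (o : Option (List Char)) (w : List Char) :
    o.map List.reverse = some w ↔ o = some w.reverse := by
  rcases o with _ | l
  · simp
  · simp [List.reverse_eq_iff]

-- the three derived directional readings
lemma check_word_bwd_iff (m : List String) (w : List Char) (i j : Int) :
    check_word m (i + (w.length : Int) - 1) (j + (w.length : Int) - 1) (-1) (-1) w = true ↔
      pvDiag m i j 1 1 w.length = some w.reverse := by
  have e : ∀ a : Int, a + (w.length : Int) - 1 = a + ((w.length : Int) - 1) * 1 := by intro a; ring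
  rw [check_word_iff_diag, e i, e j]
  have h1 : (-1 : Int) = -(1 : Int) := rfl
  rw [h1, pvDiag_reverse m 1 1 w.length i j, map_reverse_eq_some]

lemma check_word_anti_bwd_iff (m : List String) (w : List Char) (i j : Int) :
    check_word m (i + (w.length : Int) - 1) j (-1) 1 w = true ↔
      pvDiag m i (j + (w.length : Int) - 1) 1 (-1) w.length = some w.reverse := by
  have K := pvDiag_reverse m 1 (-1) w.length i (j + (w.length : Int) - 1)
  simp only [neg_neg, mul_one] at K
  have e2 : j + (w.length : Int) - 1 + ((w.length : Int) - 1) * (-1) = j := by ring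
  rw [e2] at K
  have e1 : i + ((w.length : Int) - 1) = i + (w.length : Int) - 1 := by ring
  rw [e1] at K
  rw [check_word_iff_diag, K, map_reverse_eq_some]

-- per-cell: A's four-scan condition equals B's two-extraction condition
lemma cond_eq (m : List String) (w : List Char) (i j : Int) :
    ((check_word m i j 1 1 w || check_word m (i + (w.length : Int) - 1) (j + (w.length : Int) - 1) (-1) (-1) w) &&
     (check_word m i (j + (w.length : Int) - 1) 1 (-1) w || check_word m (i + (w.length : Int) - 1) j (-1) 1 w))
      = (pvIsTarget w (pvDiag m i j 1 1 w.length) && pvIsTarget w (pvDiag m i (j + (w.length : Int) - 1) 1 (-1) w.length)) := by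
  have h1 := check_word_iff_diag m 1 1 w i j
  have h2 := check_word_bwd_iff m w i j
  have h3 := check_word_iff_diag m 1 (-1) w i (j + (w.length : Int) - 1)
  have h4 := check_word_anti_bwd_iff m w i j
  rw [Bool.eq_iff_iff]
  simp only [pvIsTarget, Bool.and_eq_true, Bool.or_eq_true, beq_iff_eq, h1, h2, h3, h4]

-- ===== VERDICT (by name: the statement is the Claim_ definition above) =====
theorem search_x_word_spec : Claim_equal_search_x_word := by
  intro m word _
  unfold Spec_search_x_word search_x_word search_x_word_alt
  simp only []
  congr 1
  funext count i
  congr 1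
  funext count j
  have hL : PySem.Str.len word = (word.toList.length : Int) := PySem.Str.len_eq word
  rw [hL, cond_eq m word.toList i j]
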